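-- pv_equiv track=rewrite | github.com/joshanashakya/dissertation | workspace/dataset/java-python/GeeksForGeeks/121/A/2.py | longestPermutation
-- ===== SOURCE A (Python) =====
-- from collections import defaultdict
--
-- def longestPermutation(a, n):
--
--     # Map data structure to
--     # count the frequency of each element
--     freq = defaultdict(int)
--
--     for i in range( n ):
--
--         freq[a[i]] += 1
--
--     length = 0
--
--     for i in range(1 , n + 1):
--
--         # If frequency of element is 0,
--         # then we can not move forward
--         # as every element should be present
--         if (freq[i] == 0):
--             break
--
--         # Increasing the length by one
--         length += 1
--
--     return length
-- ===== SOURCE B (Python) =====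
-- def longestPermutation(a, n):
--     expected = 1
--     for x in sorted(a[:max(n, 0)]):
--         if x == expected:
--             expected += 1
--         elif x > expected:
--             break
--     return expected - 1
-- ===== Notes on version B (the rewrite author's own statement) =====
-- stated objective: alternative
-- what changed: Replaces the frequency-dictionary build plus 1..n range scan with a single sort of the first-n slice followed by one linear sweep tracking the next expected value (duplicates and low values skipped, first gap breaks).
import Mathlib
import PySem

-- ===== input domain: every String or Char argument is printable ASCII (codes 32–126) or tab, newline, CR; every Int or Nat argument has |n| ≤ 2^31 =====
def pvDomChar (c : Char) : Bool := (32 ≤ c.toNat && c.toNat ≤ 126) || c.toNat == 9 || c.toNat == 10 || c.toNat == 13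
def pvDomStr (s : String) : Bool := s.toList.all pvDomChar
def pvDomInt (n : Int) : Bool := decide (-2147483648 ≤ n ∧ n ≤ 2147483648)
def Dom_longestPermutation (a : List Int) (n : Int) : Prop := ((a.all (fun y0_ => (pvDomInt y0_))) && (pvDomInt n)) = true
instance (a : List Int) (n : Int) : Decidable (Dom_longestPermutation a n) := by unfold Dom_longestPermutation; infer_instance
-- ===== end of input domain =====

-- B replaces A's frequency dictionary + 1..n scan by sorting the first-n slice and
-- sweeping it once for consecutive values starting at 1 (alternative algorithm, same results).

-- ===== PORT A =====
-- the second 'for i in range(1, n+1)' loop with its break, carrying 'length'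
def pyALoop (freq : PySem.Dict Int Int) : List Int → Int → Int
  | [], length => length
  | i :: rest, length =>
      if freq.getD i 0 = 0 then length
      else pyALoop freq rest (length + 1)

def longestPermutation (a : List Int) (n : Int) : Int :=
  let freq : PySem.Dict Int Int :=
    (PySem.List.pyRange 0 n 1).foldl
      (fun d i => d.modify (PySem.List.pyGetD a i 0) 0 (· + 1)) PySem.Dict.empty
  pyALoop freq (PySem.List.pyRange 1 (n + 1) 1) 0

-- ===== PORT B =====
-- the 'for x in sorted(...)' sweep carrying 'expected', with its break
def bScan : List Int → Int → Int
  | [], expected => expected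
  | x :: rest, expected =>
      if x = expected then bScan rest (expected + 1)
      else if expected < x then expected
      else bScan rest expected

def longestPermutation_alt (a : List Int) (n : Int) : Int :=
  bScan (PySem.List.sorted (PySem.List.slice a none (some (max n 0))) (fun x => x) false) 1 - 1

-- ===== PRECONDITION & SPEC =====
-- Pre_ excludes exactly the inputs where A raises IndexError: n larger than len(a)
def Pre_longestPermutation (a : List Int) (n : Int) : Prop := n ≤ (a.length : Int)
instance (a : List Int) (n : Int) : Decidable (Pre_longestPermutation a n) := by
  unfold Pre_longestPermutation; infer_instance

def pvWitness_longestPermutation : List Int × Int := ([2, 1, 4], 3)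

def Spec_longestPermutation (a : List Int) (n : Int) (out : Int) : Prop := out = longestPermutation_alt a n
instance (a : List Int) (n : Int) (out : Int) : Decidable (Spec_longestPermutation a n out) := by
  unfold Spec_longestPermutation; infer_instance

-- ===== CLAIM (what is proved, stated in full; the proofs are below) =====
def Claim_equal_longestPermutation : Prop := ∀ (a : List Int) (n : Int), Dom_longestPermutation a n → Pre_longestPermutation a n → Spec_longestPermutation a n (longestPermutation a n)

-- ===== LEMMAS AND PROOFS =====

-- "L is the answer for element list s": every 1..L occurs in s and L+1 does not
def GoodLen (s : List Int) (L : Int) : Prop :=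
  0 ≤ L ∧ (∀ k : Int, 1 ≤ k → k ≤ L → k ∈ s) ∧ (L + 1) ∉ s

lemma goodLen_unique {s : List Int} {L1 L2 : Int} (h1 : GoodLen s L1) (h2 : GoodLen s L2) :
    L1 = L2 := by
  obtain ⟨h10, h1m, h1n⟩ := h1
  obtain ⟨h20, h2m, h2n⟩ := h2
  by_contra hne
  rcases lt_or_gt_of_ne hne with h | h
  · exact h1n (h2m (L1 + 1) (by omega) (by omega))
  · exact h2n (h1m (L2 + 1) (by omega) (by omega))

lemma pigeonhole_not_mem (s : List Int) (m : Nat) (hlen : s.length = m)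
    (hall : ∀ k : Int, 1 ≤ k → k ≤ (m : Int) → k ∈ s) : ((m : Int) + 1) ∉ s := by
  have hsub : Finset.Icc (1 : Int) (m : Int) ⊆ s.toFinset := by
    intro k hk
    rw [Finset.mem_Icc] at hk
    exact List.mem_toFinset.mpr (hall k hk.1 hk.2)
  have hcard : s.toFinset.card ≤ (Finset.Icc (1 : Int) (m : Int)).card := by
    have := s.toFinset_card_le
    have hIcc : (Finset.Icc (1 : Int) (m : Int)).card = m := by
      rw [Int.card_Icc]; omega
    omega
  have heq : Finset.Icc (1 : Int) (m : Int) = s.toFinset :=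
    Finset.eq_of_subset_of_card_le hsub hcard
  intro hmem
  have : ((m : Int) + 1) ∈ Finset.Icc (1 : Int) (m : Int) := by
    rw [heq]; exact List.mem_toFinset.mpr hmem
  rw [Finset.mem_Icc] at this
  omega

-- the frequency dict built by A's first loop answers membership in the first-n slice
lemma freq_getD (a : List Int) (n : Int) (h0 : 0 ≤ n) (hn : n ≤ (a.length : Int)) (v : Int) :
    ((PySem.List.pyRange 0 n 1).foldl
      (fun d i => d.modify (PySem.List.pyGetD a i 0) 0 (· + 1)) (PySem.Dict.empty : PySem.Dict Int Int)).getD v 0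
      = ((a.take n.toNat).count v : Int) := by
  have hfold :
      (PySem.List.pyRange 0 n 1).foldl
        (fun d i => d.modify (PySem.List.pyGetD a i 0) 0 (· + 1)) (PySem.Dict.empty : PySem.Dict Int Int)
      = (a.take n.toNat).foldl (fun d x => d.modify x 0 (· + 1)) (PySem.Dict.empty : PySem.Dict Int Int) := by
    have hmap : (PySem.List.pyRange 0 n 1).map (fun i => PySem.List.pyGetD a i 0)
        = a.take n.toNat := by
      have hlen : ((a.take n.toNat).length : Int) = n := by
        rw [List.length_take]; omega
      have hbig := PySem.List.map_pyGetD_pyRange_zero' (xs := a.take n.toNat) (d := (0 : Int))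
      rw [hlen] at hbig
      rw [← hbig]
      apply List.map_congr_left
      intro i hi
      rw [PySem.List.mem_pyRange_one] at hi
      rw [PySem.List.pyGetD_of_nonneg a 0 hi.1, PySem.List.pyGetD_of_nonneg (a.take n.toNat) 0 hi.1]
      have hilt : i.toNat < n.toNat := by omega
      have hlta : i.toNat < a.length := by omega
      rw [List.getD_eq_getElem?_getD, List.getD_eq_getElem?_getD, List.getElem?_take]
      simp [hilt]
    rw [← hmap, List.foldl_map]
  rw [hfold]
  have := PySem.Dict.getD_foldl_modify_add_one (l := a.take n.toNat)
      (d := (PySem.Dict.empty : PySem.Dict Int Int)) (v := v)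
  simpa using this

-- A's scanning loop produces a GoodLen value (or runs off the end of the range)
lemma pyALoop_good (freq : PySem.Dict Int Int) (s : List Int)
    (hf : ∀ v, freq.getD v 0 = (s.count v : Int)) :
    ∀ (fuel : Nat) (st b : Int), (b - st).toNat = fuel → 1 ≤ st → st ≤ b →
      (∀ k : Int, 1 ≤ k → k < st → k ∈ s) →
      (st - 1 ≤ pyALoop freq (PySem.List.pyRange st b 1) (st - 1) ∧
       (∀ k : Int, 1 ≤ k → k ≤ pyALoop freq (PySem.List.pyRange st b 1) (st - 1) → k ∈ s) ∧
       ((pyALoop freq (PySem.List.pyRange st b 1) (st - 1) + 1) ∉ s ∨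
        pyALoop freq (PySem.List.pyRange st b 1) (st - 1) = b - 1)) := by
  intro fuel
  induction fuel with
  | zero =>
    intro st b hfuel h1 hsb hinv
    have hb : b = st := by omega
    subst hb
    rw [PySem.List.pyRange_one_eq_nil (by omega)]
    simp only [pyALoop]
    refine ⟨le_refl _, ?_, Or.inr (by trivial)⟩
    intro k hk1 hk2
    exact hinv k hk1 (by omega)
  | succ f ih =>
    intro st b hfuel h1 hsb hinv
    have hlt : st < b := by omega
    rw [PySem.List.pyRange_one_cons hlt]
    by_cases hz : freq.getD st 0 = 0
    · simp only [pyALoop, if_pos hz]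
      have hst : st ∉ s := by
        have := hf st
        rw [hz] at this
        have : s.count st = 0 := by omega
        exact (List.count_eq_zero).mp this
      refine ⟨le_refl _, ?_, Or.inl (by simpa using hst)⟩
      · intro k hk1 hk2
        exact hinv k hk1 (by omega)
    · simp only [pyALoop, if_neg hz]
      have hst : st ∈ s := by
        by_contra hc
        exact hz (by rw [hf st, List.count_eq_zero.mpr hc]; rfl)
      have hinv' : ∀ k : Int, 1 ≤ k → k < st + 1 → k ∈ s := by
        intro k hk1 hk2
        by_cases hk : k = st
        · exact hk ▸ hst
        · exact hinv k hk1 (by omega)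
      have := ih (st + 1) b (by omega) (by omega) (by omega) hinv'
      have harg : st - 1 + 1 = st + 1 - 1 := by omega
      rw [harg]
      exact ⟨by omega, this.2.1, by
        rcases this.2.2 with h | h
        · exact Or.inl h
        · exact Or.inr h⟩

-- B's sweep over a sorted list: everything from e up to the result is present, the result is not
lemma bScan_spec : ∀ (xs : List Int) (e : Int), xs.Pairwise (· ≤ ·) →
    e ≤ bScan xs e ∧ (∀ k : Int, e ≤ k → k < bScan xs e → k ∈ xs) ∧ bScan xs e ∉ xs := by
  intro xs
  induction xs with
  | nil =>
    intro e _
    refine ⟨le_refl _, ?_, by simp⟩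
    intro k h1 h2
    simp only [bScan] at h2
    omega
  | cons x rest ih =>
    intro e hp
    have hx : ∀ y ∈ rest, x ≤ y := (List.pairwise_cons.mp hp).1
    have hrest : rest.Pairwise (· ≤ ·) := (List.pairwise_cons.mp hp).2
    by_cases hxe : x = e
    · obtain ⟨ih1, ih2, ih3⟩ := ih (e + 1) hrest
      simp only [bScan, if_pos hxe]
      refine ⟨by omega, ?_, ?_⟩
      · intro k hk1 hk2
        by_cases hke : k = e
        · subst hke hxe; exact List.mem_cons_self
        · exact List.mem_cons_of_mem x (ih2 k (by omega) hk2)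
      · intro hc
        rcases List.mem_cons.mp hc with h | h
        · omega
        · exact ih3 h
    · by_cases hgt : e < x
      · simp only [bScan, if_neg hxe, if_pos hgt]
        refine ⟨le_refl _, ?_, ?_⟩
        · intro k h1 h2; omega
        · intro hc
          rcases List.mem_cons.mp hc with h | h
          · omega
          · have := hx e h; omega
      · obtain ⟨ih1, ih2, ih3⟩ := ih e hrest
        simp only [bScan, if_neg hxe, if_neg hgt]
        refine ⟨ih1, ?_, ?_⟩
        · intro k hk1 hk2
          exact List.mem_cons_of_mem x (ih2 k hk1 hk2)
        · intro hc
          rcases List.mem_cons.mp hc with h | h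
          · omega
          · exact ih3 h

lemma alt_good (a : List Int) (n : Int) (_h0 : 0 ≤ n) :
    GoodLen (a.take n.toNat) (longestPermutation_alt a n) := by
  unfold longestPermutation_alt
  have hslice : PySem.List.slice a none (some (max n 0)) = a.take n.toNat := by
    rw [PySem.List.slice_to a (b := max n 0) (by omega)]
    congr 1
    omega
  rw [hslice]
  set srt := PySem.List.sorted (a.take n.toNat) (fun x => x) false with hsrt
  have hpair : srt.Pairwise (· ≤ ·) := by
    have := PySem.List.sorted_pairwise (xs := a.take n.toNat) (key := fun x => x)
    simpa using this
  obtain ⟨h1, h2, h3⟩ := bScan_spec srt 1 hpair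
  have hmem : ∀ x : Int, x ∈ srt ↔ x ∈ a.take n.toNat := by
    intro x; rw [hsrt, PySem.List.mem_sorted]
  refine ⟨by omega, ?_, ?_⟩
  · intro k hk1 hk2
    exact (hmem k).mp (h2 k hk1 (by omega))
  · intro hc
    exact h3 ((hmem _).mpr (by simpa using hc))

lemma a_good (a : List Int) (n : Int) (h0 : 0 ≤ n) (hn : n ≤ (a.length : Int)) :
    GoodLen (a.take n.toNat) (longestPermutation a n) := by
  unfold longestPermutation
  set s := a.take n.toNat with hs
  have hf : ∀ v, ((PySem.List.pyRange 0 n 1).foldl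
      (fun d i => d.modify (PySem.List.pyGetD a i 0) 0 (· + 1)) (PySem.Dict.empty : PySem.Dict Int Int)).getD v 0
      = (s.count v : Int) := fun v => freq_getD a n h0 hn v
  have hrange : (1 : Int) - 1 = 0 := by norm_num
  have := pyALoop_good _ s hf (n + 1 - 1).toNat 1 (n + 1) (by omega) (by omega) (by omega)
      (by intro k h1 h2; omega)
  rw [hrange] at this
  obtain ⟨h1, h2, h3⟩ := this
  refine ⟨by omega, h2, ?_⟩
  rcases h3 with h | h
  · exact h
  · -- the loop ran to the end: result = n, and s has exactly n elements, so n+1 ∉ s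
    rw [h]
    have hslen : s.length = n.toNat := by
      rw [hs, List.length_take]; omega
    have hcast : ((n.toNat : Nat) : Int) = n := by omega
    have := pigeonhole_not_mem s n.toNat hslen (by
      intro k hk1 hk2
      exact h2 k hk1 (by omega))
    rw [hcast] at this
    have harith : n + 1 - 1 + 1 = n + 1 := by omega
    rw [harith]
    exact this

-- ===== VERDICT (by name: the statement is the Claim_ definition above) =====
theorem longestPermutation_spec : Claim_equal_longestPermutation := by
  intro a n _ hpre
  unfold Spec_longestPermutation
  unfold Pre_longestPermutation at hpre
  by_cases h0 : 0 ≤ n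
  · exact goodLen_unique (a_good a n h0 hpre) (alt_good a n h0)
  · -- n < 0: both loops are empty / the slice is empty; both return 0
    have hneg : n < 0 := by omega
    have hA : longestPermutation a n = 0 := by
      have hdef : longestPermutation a n =
          pyALoop ((PySem.List.pyRange 0 n 1).foldl
              (fun d i => d.modify (PySem.List.pyGetD a i 0) 0 (· + 1)) (PySem.Dict.empty : PySem.Dict Int Int))
            (PySem.List.pyRange 1 (n + 1) 1) 0 := rfl
      rw [hdef, PySem.List.pyRange_one_eq_nil (show n + 1 ≤ 1 by omega)]
      rfl
    have hB : longestPermutation_alt a n = 0 := by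
      unfold longestPermutation_alt
      have hm : max n 0 = 0 := by omega
      rw [hm]
      rw [PySem.List.slice_to a (b := 0) (by omega)]
      norm_num [bScan, PySem.List.sorted]
    rw [hA, hB]
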